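-- pv_equiv track=rewrite | github.com/Prot0c0lM0nk/protocol_monk | NeuralSym/patterns/sequence_analyzer.py | _tools_similar
-- ===== SOURCE A (Python) =====
-- def _tools_similar(tool1: str, tool2: str) -> bool:
--     """Check if two tools are similar in purpose"""
--     # Simple heuristic based on tool names
--     tool_categories = {
--         "file_read": ["show_file", "read_file", "cat_file"],
--         "file_write": ["create_file", "edit_file", "write_file"],
--         "command": ["execute_command", "run_command", "exec"],
--         "search": ["search_files", "find_files", "grep"],
--         "list": ["list_files", "ls", "dir"],
--     }
--
--     for category, tools in tool_categories.items():
--         if tool1 in tools and tool2 in tools: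
--             return True
--
--     # Check for common substrings
--     common_terms = ["file", "command", "search", "list", "edit"]
--     for term in common_terms:
--         if term in tool1.lower() and term in tool2.lower():
--             return True
--
--     return False
-- ===== SOURCE B (Python) =====
-- def _tools_similar(tool1: str, tool2: str) -> bool:
--     """Check if two tools are similar in purpose"""
--     tool_categories = {
--         "file_read": ["show_file", "read_file", "cat_file"],
--         "file_write": ["create_file", "edit_file", "write_file"],
--         "command": ["execute_command", "run_command", "exec"],
--         "search": ["search_files", "find_files", "grep"],
--         "list": ["list_files", "ls", "dir"],
--     }
--     common_terms = ["file", "command", "search", "list", "edit"]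
--
--     def features(tool):
--         """All similarity tags of one tool: its category tag and every common term it contains."""
--         lowered = tool.lower()
--         tags = set()
--         for category, tools in tool_categories.items():
--             if tool in tools:
--                 tags.add(("cat", category))
--         for term in common_terms:
--             if term in lowered:
--                 tags.add(("term", term))
--         return tags
--
--     # two tools are similar iff they share at least one feature tag
--     return not features(tool1).isdisjoint(features(tool2))
-- ===== Notes on version B (the rewrite author's own statement) =====
-- stated objective: alternative
-- what changed: Replaces A's two staged joint-loops (per-category dual membership, then per-term dual substring test) with a feature-set algorithm: each tool is independently mapped to a set of tags (its category tag plus every common term it contains) and similarity is decided by a single set-disjointness test; correct because categories are disjoint and the two tag kinds cannot collide.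
import Mathlib
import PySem

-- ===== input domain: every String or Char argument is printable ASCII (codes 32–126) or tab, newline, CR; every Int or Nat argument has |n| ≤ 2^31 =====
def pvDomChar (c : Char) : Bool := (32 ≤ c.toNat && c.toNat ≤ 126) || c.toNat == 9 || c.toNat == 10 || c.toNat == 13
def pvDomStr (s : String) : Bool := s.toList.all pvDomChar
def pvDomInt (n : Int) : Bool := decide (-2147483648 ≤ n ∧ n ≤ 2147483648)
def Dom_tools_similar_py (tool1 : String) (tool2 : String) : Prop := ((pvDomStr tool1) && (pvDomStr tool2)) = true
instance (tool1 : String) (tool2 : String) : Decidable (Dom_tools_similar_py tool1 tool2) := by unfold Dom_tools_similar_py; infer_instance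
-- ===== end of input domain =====

-- B replaces A's two staged joint loops by a per-tool feature set (category tag + contained
-- common terms) and one set-disjointness test; alternative decomposition, same cost.

-- ===== PORT A =====
-- the literal category table (dict iterated in insertion order)
def pvCats : List (String × List String) :=
  [("file_read", ["show_file", "read_file", "cat_file"]),
   ("file_write", ["create_file", "edit_file", "write_file"]),
   ("command", ["execute_command", "run_command", "exec"]),
   ("search", ["search_files", "find_files", "grep"]),
   ("list", ["list_files", "ls", "dir"])]

def pvTerms : List String := ["file", "command", "search", "list", "edit"]

-- 'for category, tools in tool_categories.items(): if tool1 in tools and tool2 in tools: return True'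
def pvLoopCats : List (String × List String) → String → String → Bool
  | [], _, _ => false
  | (_, tools) :: rest, t1, t2 =>
      if tools.contains t1 && tools.contains t2 then true else pvLoopCats rest t1 t2

-- 'for term in common_terms: if term in tool1.lower() and term in tool2.lower(): return True'
def pvLoopTerms : List String → String → String → Bool
  | [], _, _ => false
  | term :: rest, t1, t2 =>
      if PySem.Str.isIn term (PySem.Str.lower t1) && PySem.Str.isIn term (PySem.Str.lower t2)
      then true else pvLoopTerms rest t1 t2

def tools_similar_py (tool1 : String) (tool2 : String) : Bool :=
  if pvLoopCats pvCats tool1 tool2 then true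
  else if pvLoopTerms pvTerms tool1 tool2 then true
  else false

-- ===== PORT B =====
-- features(tool): the set of similarity tags of one tool — its category tag and every common term it contains
def pvFeatures (tool : String) : PySem.Set (String × String) :=
  let lowered := PySem.Str.lower tool
  let tags : PySem.Set (String × String) :=
    pvCats.foldl (fun s p => if p.2.contains tool then PySem.Set.add s ("cat", p.1) else s)
      PySem.Set.empty
  pvTerms.foldl (fun s term => if PySem.Str.isIn term lowered then PySem.Set.add s ("term", term) else s)
    tags

-- 'return not features(tool1).isdisjoint(features(tool2))'
def tools_similar_py_alt (tool1 : String) (tool2 : String) : Bool :=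
  !(PySem.Set.isdisjoint (pvFeatures tool1) (pvFeatures tool2))

-- ===== PRECONDITION & SPEC =====
def Spec_tools_similar_py (tool1 : String) (tool2 : String) (out : Bool) : Prop := out = tools_similar_py_alt tool1 tool2
instance (tool1 : String) (tool2 : String) (out : Bool) : Decidable (Spec_tools_similar_py tool1 tool2 out) := by unfold Spec_tools_similar_py; infer_instance

-- ===== CLAIM (what is proved, stated in full; the proofs are below) =====
def Claim_equal_tools_similar_py : Prop := ∀ (tool1 : String) (tool2 : String), Dom_tools_similar_py tool1 tool2 → Spec_tools_similar_py tool1 tool2 (tools_similar_py tool1 tool2)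

-- ===== LEMMAS AND PROOFS =====

-- A's loops are first-hit scans: equal to List.any
theorem loopCats_eq_any (l : List (String × List String)) (t1 t2 : String) :
    pvLoopCats l t1 t2 = l.any (fun p => p.2.contains t1 && p.2.contains t2) := by
  induction l with
  | nil => rfl
  | cons a l ih =>
    obtain ⟨c, tools⟩ := a
    rw [pvLoopCats, List.any_cons]
    split_ifs with h
    · rw [h, Bool.true_or]
    · rw [Bool.eq_false_iff.mpr h, Bool.false_or, ih]

theorem loopTerms_eq_any (l : List String) (t1 t2 : String) :
    pvLoopTerms l t1 t2 =
      l.any (fun term => PySem.Str.isIn term (PySem.Str.lower t1) &&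
                         PySem.Str.isIn term (PySem.Str.lower t2)) := by
  induction l with
  | nil => rfl
  | cons a l ih =>
    rw [pvLoopTerms, List.any_cons]
    split_ifs with h
    · rw [h, Bool.true_or]
    · rw [Bool.eq_false_iff.mpr h, Bool.false_or, ih]

-- membership in a conditional add-fold (the shape both of B's feature loops take)
theorem mem_foldl_ite_add {α β : Type} [BEq β] [LawfulBEq β]
    (l : List α) (p : α → Bool) (f : α → β) (s : PySem.Set β) (y : β) :
    y ∈ l.foldl (fun s x => if p x then PySem.Set.add s (f x) else s) s ↔
      y ∈ s ∨ ∃ x ∈ l, p x = true ∧ y = f x := by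
  induction l generalizing s with
  | nil => simp
  | cons a l ih =>
    simp only [List.foldl_cons]
    split_ifs with h
    · rw [ih, PySem.Set.mem_add]; simp [h]; tauto
    · rw [ih]
      constructor
      · rintro (hy | ⟨x, hx, hp, rfl⟩)
        · exact Or.inl hy
        · exact Or.inr ⟨x, List.mem_cons_of_mem _ hx, hp, rfl⟩
      · rintro (hy | ⟨x, hx, hp, rfl⟩)
        · exact Or.inl hy
        · rcases List.mem_cons.mp hx with rfl | hx
          · exact absurd hp (by simp [h])
          · exact Or.inr ⟨x, hx, hp, rfl⟩

-- membership in a tool's feature set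
theorem mem_pvFeatures (t : String) (y : String × String) :
    y ∈ pvFeatures t ↔
      (∃ p ∈ pvCats, p.2.contains t = true ∧ y = ("cat", p.1)) ∨
      (∃ term ∈ pvTerms, PySem.Str.isIn term (PySem.Str.lower t) = true ∧ y = ("term", term)) := by
  unfold pvFeatures
  rw [mem_foldl_ite_add, mem_foldl_ite_add]
  simp [PySem.Set.empty]

-- categories with the same name coincide in the table
theorem pvCats_key_inj : ∀ p ∈ pvCats, ∀ q ∈ pvCats, p.1 = q.1 → p = q := by decide

theorem tools_similar_py_spec' (t1 t2 : String) :
    tools_similar_py t1 t2 = tools_similar_py_alt t1 t2 := by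
  rw [Bool.eq_iff_iff]
  unfold tools_similar_py tools_similar_py_alt
  rw [Bool.not_eq_true', Bool.eq_false_iff]
  constructor
  · intro h hd
    split_ifs at h with hc ht
    · rcases List.any_eq_true.mp (loopCats_eq_any pvCats t1 t2 ▸ hc) with ⟨p, hp, hb⟩
      rw [Bool.and_eq_true] at hb
      obtain ⟨h1, h2⟩ := hb
      exact (PySem.Set.isdisjoint_iff _ _).mp hd ("cat", p.1)
        ((mem_pvFeatures t1 _).mpr (Or.inl ⟨p, hp, h1, rfl⟩))
        ((mem_pvFeatures t2 _).mpr (Or.inl ⟨p, hp, h2, rfl⟩))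
    · rcases List.any_eq_true.mp (loopTerms_eq_any pvTerms t1 t2 ▸ ht) with ⟨term, hm, hb⟩
      rw [Bool.and_eq_true] at hb
      obtain ⟨h1, h2⟩ := hb
      exact (PySem.Set.isdisjoint_iff _ _).mp hd ("term", term)
        ((mem_pvFeatures t1 _).mpr (Or.inr ⟨term, hm, h1, rfl⟩))
        ((mem_pvFeatures t2 _).mpr (Or.inr ⟨term, hm, h2, rfl⟩))
  · intro hnd
    have hshared : ∃ y ∈ pvFeatures t1, y ∈ pvFeatures t2 := by
      by_contra hno
      push Not at hno
      exact hnd ((PySem.Set.isdisjoint_iff _ _).mpr hno)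
    obtain ⟨y, hy1, hy2⟩ := hshared
    rcases (mem_pvFeatures t1 y).mp hy1 with ⟨p, hp, hc1, rfl⟩ | ⟨a, ha, h1, rfl⟩ <;>
      rcases (mem_pvFeatures t2 _).mp hy2 with ⟨q, hq, hc2, he⟩ | ⟨b, hb, h2, he⟩
    · -- both category tags: same category name ⇒ same table row
      have hpq : p = q := pvCats_key_inj p hp q hq (Prod.mk.inj he).2
      subst hpq
      have hC : pvLoopCats pvCats t1 t2 = true := by
        rw [loopCats_eq_any]
        exact List.any_eq_true.mpr ⟨p, hp, by rw [Bool.and_eq_true]; exact ⟨hc1, hc2⟩⟩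
      simp [hC]
    · exact absurd he (by simp)
    · exact absurd he (by simp)
    · -- both term tags: same term
      obtain h := (Prod.mk.inj he).2
      subst h
      have hT : pvLoopTerms pvTerms t1 t2 = true := by
        rw [loopTerms_eq_any]
        exact List.any_eq_true.mpr ⟨a, ha, by rw [Bool.and_eq_true]; exact ⟨h1, h2⟩⟩
      split_ifs <;> simp_all

-- ===== VERDICT (by name: the statement is the Claim_ definition above) =====
theorem tools_similar_py_spec : Claim_equal_tools_similar_py := by
  intro t1 t2 _
  exact tools_similar_py_spec' t1 t2
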